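-- pv_equiv track=rewrite | github.com/AI4EPS/CCTorch | cctorch/data.py | generate_block_index
-- ===== SOURCE A (Python) =====
-- def generate_block_index(group1, group2, pair_list, min_sample_per_block=1):
--     block_index = [(i, j) for i in range(len(group1)) for j in range(len(group2))]
--     num_empty_index = []
--     for i, j in block_index:
--         num_samples = 0
--         event1, event2 = group1[i], group2[j]
--         for ii in range(len(event1)):
--             for jj in range(len(event2)):
--                 if (event1[ii], event2[jj]) not in pair_list:
--                     continue
--                 num_samples += 1
--         if num_samples > min_sample_per_block:
--             num_empty_index.append((i, j))
--     return num_empty_index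
-- ===== SOURCE B (Python) =====
-- def generate_block_index(group1, group2, pair_list, min_sample_per_block=1):
--     # Precompute per-event value counters and the distinct pairs once, then each
--     # block's match count is a sum of count products over the distinct pairs.
--     distinct = list(dict.fromkeys(pair_list))
--     def counter(xs):
--         c = {}
--         for x in xs:
--             c[x] = c.get(x, 0) + 1
--         return c
--     cnt1 = [counter(e) for e in group1]
--     cnt2 = [counter(e) for e in group2]
--     out = []
--     for i, c1 in enumerate(cnt1):
--         for j, c2 in enumerate(cnt2):
--             n = 0
--             for a, b in distinct:
--                 n += c1.get(a, 0) * c2.get(b, 0)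
--             if n > min_sample_per_block:
--                 out.append((i, j))
--     return out
-- ===== Notes on version B (the rewrite author's own statement) =====
-- stated objective: faster
-- what changed: Instead of testing every (element1, element2) pair of every block against pair_list with a linear membership scan, B deduplicates pair_list once, precomputes a value counter per event, and scores each block as the sum over distinct pairs of the product of the two counters.
import Mathlib
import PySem

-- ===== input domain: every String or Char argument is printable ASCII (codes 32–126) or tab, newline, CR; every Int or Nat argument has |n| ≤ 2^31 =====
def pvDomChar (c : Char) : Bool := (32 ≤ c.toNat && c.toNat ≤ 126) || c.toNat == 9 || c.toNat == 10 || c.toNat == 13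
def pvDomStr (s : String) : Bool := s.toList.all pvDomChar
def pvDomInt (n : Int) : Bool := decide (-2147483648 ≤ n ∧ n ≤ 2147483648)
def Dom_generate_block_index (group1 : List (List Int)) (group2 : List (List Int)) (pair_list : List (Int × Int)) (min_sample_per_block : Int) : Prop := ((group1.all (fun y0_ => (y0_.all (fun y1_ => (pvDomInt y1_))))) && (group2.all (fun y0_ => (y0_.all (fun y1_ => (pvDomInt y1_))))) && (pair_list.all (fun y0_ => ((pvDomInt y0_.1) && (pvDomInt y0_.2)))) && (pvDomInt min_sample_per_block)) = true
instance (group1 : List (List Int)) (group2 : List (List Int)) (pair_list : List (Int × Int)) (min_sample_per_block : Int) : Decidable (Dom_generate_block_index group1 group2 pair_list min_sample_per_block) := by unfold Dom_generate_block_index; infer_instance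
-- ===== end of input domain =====

-- B replaces the per-block scan over all element pairs (with a linear membership test
-- in pair_list for each) by per-event counters and one sum over the distinct pairs.

-- ===== PORT A =====
def generate_block_index (group1 : List (List Int)) (group2 : List (List Int)) (pair_list : List (Int × Int)) (min_sample_per_block : Int) : List (Int × Int) :=
  let block_index := (PySem.List.pyRange 0 (group1.length : Int) 1).flatMap
      (fun i => (PySem.List.pyRange 0 (group2.length : Int) 1).map (fun j => (i, j)))
  block_index.foldl (fun num_empty_index ij =>
    let event1 := PySem.List.pyGetD group1 ij.1 []
    let event2 := PySem.List.pyGetD group2 ij.2 []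
    let num_samples :=
      (PySem.List.pyRange 0 (event1.length : Int) 1).foldl (fun n ii =>
        (PySem.List.pyRange 0 (event2.length : Int) 1).foldl (fun n jj =>
          if (PySem.List.pyGetD event1 ii 0, PySem.List.pyGetD event2 jj 0) ∈ pair_list
          then n + 1 else n) n) (0 : Int)
    if num_samples > min_sample_per_block then num_empty_index ++ [ij] else num_empty_index) []

-- ===== PORT B =====
-- counter(xs): c = {}; for x in xs: c[x] = c.get(x, 0) + 1
def pvCounterB (xs : List Int) : PySem.Dict Int Int :=
  xs.foldl (fun c x => c.modify x 0 (· + 1)) PySem.Dict.empty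

def generate_block_index_alt (group1 : List (List Int)) (group2 : List (List Int)) (pair_list : List (Int × Int)) (min_sample_per_block : Int) : List (Int × Int) :=
  let distinct := PySem.List.dedup pair_list   -- list(dict.fromkeys(pair_list))
  let cnt1 := group1.map pvCounterB
  let cnt2 := group2.map pvCounterB
  (PySem.List.enumerate cnt1).foldl (fun out ic =>
    (PySem.List.enumerate cnt2).foldl (fun out jc =>
      let n := distinct.foldl (fun n p => n + ic.2.getD p.1 0 * jc.2.getD p.2 0) (0 : Int)
      if n > min_sample_per_block then out ++ [(ic.1, jc.1)] else out) out) []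

-- ===== PRECONDITION & SPEC =====
def Spec_generate_block_index (group1 : List (List Int)) (group2 : List (List Int)) (pair_list : List (Int × Int)) (min_sample_per_block : Int) (out : List (Int × Int)) : Prop := out = generate_block_index_alt group1 group2 pair_list min_sample_per_block
instance (group1 : List (List Int)) (group2 : List (List Int)) (pair_list : List (Int × Int)) (min_sample_per_block : Int) (out : List (Int × Int)) : Decidable (Spec_generate_block_index group1 group2 pair_list min_sample_per_block out) := by unfold Spec_generate_block_index; infer_instance

-- ===== CLAIM (what is proved, stated in full; the proofs are below) =====
def Claim_equal_generate_block_index : Prop := ∀ (group1 : List (List Int)) (group2 : List (List Int)) (pair_list : List (Int × Int)) (min_sample_per_block : Int), Dom_generate_block_index group1 group2 pair_list min_sample_per_block → Spec_generate_block_index group1 group2 pair_list min_sample_per_block (generate_block_index group1 group2 pair_list min_sample_per_block)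

-- ===== LEMMAS AND PROOFS =====

-- the common per-block count: Σ over distinct pairs of (count in e1) * (count in e2)
def pvCnt (e1 e2 : List Int) (P : List (Int × Int)) : Int :=
  ((PySem.List.dedup P).map (fun p => (e1.count p.1 : Int) * (e2.count p.2 : Int))).sum

-- Σ_{p ∈ D} [p = q] = [q ∈ D] for a Nodup D
theorem pv_sum_ite_eq_mem {α : Type} [DecidableEq α] (D : List α) (hD : D.Nodup) (q : α) :
    ((D.map (fun p => if p = q then (1 : Int) else 0)).sum) = (if q ∈ D then 1 else 0) := by
  induction D with
  | nil => simp
  | cons x D ih =>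
    simp only [List.nodup_cons] at hD
    simp only [List.map_cons, List.sum_cons, ih hD.2, List.mem_cons]
    by_cases hx : x = q
    · subst hx
      simp [hD.1]
    · simp [hx, Ne.symm hx]

-- inner: number of y in e2 with (x,y) ∈ P, as a sum over the distinct pairs
theorem pv_inner (e2 : List Int) (P : List (Int × Int)) (x : Int) :
    ((e2.countP (fun y => decide ((x, y) ∈ P)) : Int)) =
      ((PySem.List.dedup P).map (fun p => if p.1 = x then (e2.count p.2 : Int) else 0)).sum := by
  induction e2 with
  | nil => simp
  | cons y e2 ih =>
    have hsum := pv_sum_ite_eq_mem (PySem.List.dedup P) (PySem.List.nodup_dedup P) (x, y)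
    simp only [PySem.List.mem_dedup] at hsum
    have hmap : List.map (fun p => if p.1 = x then ((y :: e2).count p.2 : Int) else 0) (PySem.List.dedup P)
        = List.map (fun p => (if p.1 = x then (e2.count p.2 : Int) else 0) + (if p = (x, y) then 1 else 0)) (PySem.List.dedup P) := by
      refine List.map_congr_left (fun p _ => ?_)
      by_cases h1 : p.1 = x
      · by_cases h2 : p.2 = y
        · have hp : p = (x, y) := Prod.ext h1 h2
          simp only [hp, if_true, List.count_cons]
          push_cast
          simp
        · have hp : p ≠ (x, y) := fun h => h2 (by rw [h])
          have h2' : ¬ y = p.2 := fun h => h2 h.symm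
          simp [h1, hp, h2']
      · have hp : p ≠ (x, y) := fun h => h1 (by rw [h])
        simp [h1, hp]
    rw [hmap, PySem.List.sum_map_add_int, hsum, ← ih, List.countP_cons]
    by_cases hy : (x, y) ∈ P
    · simp [hy]
    · simp [hy]

-- A's per-block double scan equals pvCnt
theorem pv_countA_eq (e1 e2 : List Int) (P : List (Int × Int)) :
    (e1.map (fun x => (e2.countP (fun y => decide ((x, y) ∈ P)) : Int))).sum = pvCnt e1 e2 P := by
  induction e1 with
  | nil => simp [pvCnt]
  | cons x e1 ih =>
    simp only [List.map_cons, List.sum_cons, ih, pvCnt]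
    rw [pv_inner]
    rw [← PySem.List.sum_map_add_int]
    refine congrArg List.sum (List.map_congr_left (fun p _ => ?_))
    by_cases h1 : p.1 = x
    · simp only [h1, if_true, List.count_cons]
      push_cast
      simp
      ring
    · simp only [h1, if_false, List.count_cons]
      have h1' : ¬ x = p.1 := fun h => h1 h.symm
      simp [h1']

-- B's getD of the counter is the count
theorem pv_counterB_getD (xs : List Int) (v : Int) : (pvCounterB xs).getD v 0 = (xs.count v : Int) := by
  rw [pvCounterB, ← PySem.Dict.counter_eq_foldl, PySem.Dict.getD_counter]

-- ===== VERDICT (by name: the statement is the Claim_ definition above) =====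
-- A's inner index loop over event2 counts the matching partners of x
theorem pv_Lin (e2 : List Int) (P : List (Int × Int)) (x n : Int) :
    (PySem.List.pyRange 0 (e2.length : Int) 1).foldl (fun n jj =>
        if (x, PySem.List.pyGetD e2 jj 0) ∈ P then n + 1 else n) n
      = n + (e2.countP (fun y => decide ((x, y) ∈ P)) : Int) := by
  rw [PySem.List.foldl_pyRange_zero_pyGetD' e2 0 (fun n y => if (x, y) ∈ P then n + 1 else n) n,
    PySem.List.foldl_ite_add_one]

-- A's outer index loop over event1 sums them, giving pvCnt
theorem pv_Lout (e1 e2 : List Int) (P : List (Int × Int)) :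
    (PySem.List.pyRange 0 (e1.length : Int) 1).foldl (fun n ii =>
        n + (e2.countP (fun y => decide ((PySem.List.pyGetD e1 ii 0, y) ∈ P)) : Int)) 0
      = pvCnt e1 e2 P := by
  rw [PySem.List.foldl_pyRange_zero_pyGetD' e1 0
      (fun n x => n + (e2.countP (fun y => decide ((x, y) ∈ P)) : Int)) 0,
    PySem.List.foldl_add, zero_add, pv_countA_eq]

theorem generate_block_index_spec : Claim_equal_generate_block_index := by
  intro g1 g2 P m _
  unfold Spec_generate_block_index generate_block_index generate_block_index_alt
  simp only [pv_Lin, pv_Lout]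
  simp only [PySem.List.foldl_add, zero_add,
    PySem.List.foldl_append_ite,
    PySem.List.foldl_append_eq_flatMap, List.nil_append,
    PySem.List.enumerate_eq_map_pyRange _ (pvCounterB []),
    List.flatMap_map, List.filter_map, List.length_map,
    PySem.List.pyGetD_map, pv_counterB_getD, PySem.List.len_eq, pvCnt]
  refine Eq.trans (PySem.List.foldl_append_ite_eq_filter _ _ _) ?_
  simp only [List.nil_append, List.filter_flatMap, List.filter_map, List.map_map,
    Function.comp_def, List.map_map, pv_counterB_getD]
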